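-- pv_equiv track=rewrite | github.com/SaltyPeppermint/captici-orchestrator | test_orchestrator/testing/commits.py | commits_between
-- ===== SOURCE A (Python) =====
-- from typing import List
--
-- def commits_between(
--         all_commit_hashs: List[str], first_commit_hash: str, last_commit_hash: str) -> List[str]:
--     ix = iy = 0
--     for i, v in enumerate(all_commit_hashs):
--         if v == first_commit_hash:
--             ix = i
--         if v == last_commit_hash:
--             iy = i
--             break
--
--     return all_commit_hashs[ix:iy]
-- ===== SOURCE B (Python) =====
-- def commits_between(all_commit_hashs, first_commit_hash, last_commit_hash):
--     try:
--         iy = all_commit_hashs.index(last_commit_hash)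
--     except ValueError:
--         return []
--     ix = 0
--     for j in range(iy, -1, -1):
--         if all_commit_hashs[j] == first_commit_hash:
--             ix = j
--             break
--     return all_commit_hashs[ix:iy]
-- ===== Notes on version B (the rewrite author's own statement) =====
-- stated objective: alternative
-- what changed: A's single forward scan with break and two running indices is replaced by two phases: list.index to find the end index, then a reverse scan of that prefix for the last occurrence of the start hash.
import Mathlib
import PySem

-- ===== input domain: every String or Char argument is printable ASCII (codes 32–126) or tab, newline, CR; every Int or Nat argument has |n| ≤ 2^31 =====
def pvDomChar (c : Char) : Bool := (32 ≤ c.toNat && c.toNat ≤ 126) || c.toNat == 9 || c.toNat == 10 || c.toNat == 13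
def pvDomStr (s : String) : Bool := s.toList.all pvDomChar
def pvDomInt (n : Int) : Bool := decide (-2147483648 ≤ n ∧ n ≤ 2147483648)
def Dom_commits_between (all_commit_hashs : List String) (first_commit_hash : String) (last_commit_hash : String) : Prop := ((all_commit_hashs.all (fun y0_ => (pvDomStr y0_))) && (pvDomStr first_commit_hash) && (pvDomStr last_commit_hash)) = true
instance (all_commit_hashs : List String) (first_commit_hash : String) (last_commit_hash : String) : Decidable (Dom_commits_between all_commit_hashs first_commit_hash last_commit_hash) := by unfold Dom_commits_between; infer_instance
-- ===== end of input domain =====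

-- B replaces A's single forward scan (with break) by: find the first index of last_commit_hash,
-- then reverse-scan that prefix for the last occurrence of first_commit_hash (objective: alternative decomposition).

-- ===== PORT A =====
-- A's for-loop over enumerate(...) with break, carrying (ix, iy) and the running index i.
def commitsALoop (first_commit_hash last_commit_hash : String) :
    List String → Nat → Nat × Nat → Nat × Nat
  | [], _, st => st
  | v :: rest, i, (ix, iy) =>
    let ix' := if v == first_commit_hash then i else ix
    if v == last_commit_hash then (ix', i)
    else commitsALoop first_commit_hash last_commit_hash rest (i + 1) (ix', iy)

def commits_between (all_commit_hashs : List String) (first_commit_hash : String) (last_commit_hash : String) : List String :=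
  PySem.List.slice all_commit_hashs
    (some ((commitsALoop first_commit_hash last_commit_hash all_commit_hashs 0 (0, 0)).1 : Int))
    (some ((commitsALoop first_commit_hash last_commit_hash all_commit_hashs 0 (0, 0)).2 : Int))

-- ===== PORT B =====
-- B's downward for-loop 'for j in range(iy, -1, -1): if xs[j] == first: ix = j; break', default ix = 0.
def commitsBFind (all_commit_hashs : List String) (first_commit_hash : String) : Nat → Nat
  | 0 => if all_commit_hashs.getD 0 "" == first_commit_hash then 0 else 0
  | j + 1 =>
    if all_commit_hashs.getD (j + 1) "" == first_commit_hash then j + 1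
    else commitsBFind all_commit_hashs first_commit_hash j

def commits_between_alt (all_commit_hashs : List String) (first_commit_hash : String) (last_commit_hash : String) : List String :=
  match PySem.List.index? all_commit_hashs last_commit_hash with
  | none => []
  | some iy =>
    PySem.List.slice all_commit_hashs
      (some ((commitsBFind all_commit_hashs first_commit_hash iy : Nat) : Int))
      (some (iy : Int))

-- ===== PRECONDITION & SPEC =====
def Spec_commits_between (all_commit_hashs : List String) (first_commit_hash : String) (last_commit_hash : String) (out : List String) : Prop := out = commits_between_alt all_commit_hashs first_commit_hash last_commit_hash
instance (all_commit_hashs : List String) (first_commit_hash : String) (last_commit_hash : String) (out : List String) : Decidable (Spec_commits_between all_commit_hashs first_commit_hash last_commit_hash out) := by unfold Spec_commits_between; infer_instance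

-- ===== CLAIM (what is proved, stated in full; the proofs are below) =====
def Claim_equal_commits_between : Prop := ∀ (all_commit_hashs : List String) (first_commit_hash : String) (last_commit_hash : String), Dom_commits_between all_commit_hashs first_commit_hash last_commit_hash → Spec_commits_between all_commit_hashs first_commit_hash last_commit_hash (commits_between all_commit_hashs first_commit_hash last_commit_hash)

-- ===== LEMMAS AND PROOFS =====

-- last index t ≤ k with xs[t] = f, structural over xs
def lastLE (f : String) : List String → Nat → Option Nat
  | [], _ => none
  | v :: rest, k =>
    match k with
    | 0 => if v = f then some 0 else none
    | k' + 1 =>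
      match lastLE f rest k' with
      | some t => some (t + 1)
      | none => if v = f then some 0 else none

theorem aLoop_notFound_snd (f l : String) (xs : List String) (i : Nat) (ix iy : Nat)
    (h : l ∉ xs) :
    (commitsALoop f l xs i (ix, iy)).2 = iy := by
  induction xs generalizing i ix with
  | nil => rfl
  | cons v rest ih =>
    simp only [List.mem_cons, not_or] at h
    obtain ⟨hv, hrest⟩ := h
    simp only [commitsALoop]
    rw [if_neg (by simp [beq_iff_eq]; exact fun h => hv h.symm)]
    exact ih _ _ hrest

theorem aLoop_found (f l : String) (xs : List String) (k : Nat)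
    (hk : PySem.List.index? xs l = some k) :
    ∀ (i ix iy : Nat),
    commitsALoop f l xs i (ix, iy) =
      ((match lastLE f xs k with
        | some t => i + t
        | none => ix), i + k) := by
  induction xs generalizing k with
  | nil => simp [PySem.List.index?] at hk
  | cons v rest ih =>
    intro i ix iy
    by_cases hv : v = l
    · subst hv
      rw [PySem.List.index?_cons_self] at hk
      injection hk with hk0
      subst hk0
      simp only [commitsALoop, if_pos (by simp : (v == v) = true), lastLE]
      by_cases hf : v = f <;> simp [hf, beq_iff_eq]
    · rw [PySem.List.index?_cons_of_ne rest hv] at hk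
      cases hkr : PySem.List.index? rest l with
      | none => rw [hkr] at hk; simp at hk
      | some k' =>
        rw [hkr] at hk
        simp only [Option.map_some] at hk
        injection hk with hk0
        subst hk0
        simp only [commitsALoop]
        rw [if_neg (by simpa [beq_iff_eq] using hv)]
        rw [ih _ hkr]
        simp only [lastLE]
        cases hL : lastLE f rest k' with
        | some t => simp [Nat.add_assoc, Nat.add_comm 1 t, Nat.add_comm 1 k']
        | none =>
          simp only []
          by_cases hf : v = f <;> simp [hf, beq_iff_eq] <;> omega

theorem lastLE_step (f : String) (xs : List String) (k : Nat) (hk : k + 1 < xs.length) :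
    lastLE f xs (k + 1) =
      if xs.getD (k + 1) "" = f then some (k + 1) else lastLE f xs k := by
  induction xs generalizing k with
  | nil => simp at hk
  | cons v rest ih =>
    cases k with
    | zero =>
      cases rest with
      | nil => simp at hk
      | cons w rest' =>
        simp only [lastLE, List.getD_cons_succ, List.getD_cons_zero]
        by_cases hw : w = f <;> simp [hw]
    | succ k' =>
      simp only [List.length_cons] at hk
      simp only [lastLE, List.getD_cons_succ]
      rw [ih k' (by omega)]
      by_cases hr : rest.getD (k' + 1) "" = f
      · simp only [List.getD_eq_getElem?_getD] at hr ⊢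
        simp [hr]
      · simp only [List.getD_eq_getElem?_getD] at hr ⊢
        simp [hr]

theorem bFind_eq_lastLE (xs : List String) (f : String) (k : Nat) (hk : k < xs.length) :
    commitsBFind xs f k = (lastLE f xs k).getD 0 := by
  induction k with
  | zero =>
    cases xs with
    | nil => simp at hk
    | cons v rest =>
      simp only [commitsBFind, List.getD_cons_zero, lastLE]
      by_cases hv : v = f <;> simp [hv]
  | succ k' ih =>
    rw [lastLE_step f xs k' hk]
    simp only [commitsBFind, List.getD_eq_getElem?_getD]
    by_cases hx : xs[k' + 1]?.getD "" = f
    · simp [hx]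
    · simp [hx, ih (by omega)]

-- ===== VERDICT (by name: the statement is the Claim_ definition above) =====
theorem commits_between_spec : Claim_equal_commits_between := by
  intro xs f l _
  unfold Spec_commits_between commits_between commits_between_alt
  cases hidx : PySem.List.index? xs l with
  | none =>
    have hnm : l ∉ xs := (PySem.List.index?_eq_none_iff xs l).mp hidx
    rw [aLoop_notFound_snd f l xs 0 0 0 hnm]
    rw [show ((0 : Nat) : Int) = (((0 : Nat) : Nat) : Int) by simp,
        PySem.List.slice_natCast]
    simp
  | some k =>
    obtain ⟨hklen, -, -⟩ := PySem.List.getElem_of_index?_eq_some hidx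
    change _ = PySem.List.slice xs (some ((commitsBFind xs f k : Nat) : Int)) (some (k : Int))
    rw [aLoop_found f l xs k hidx 0 0 0]
    rw [bFind_eq_lastLE xs f k hklen]
    cases lastLE f xs k <;> simp
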